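-- pv_equiv track=rewrite | github.com/sungmin2nn/new_pick | scripts/dedupe_arena_data.py | dedupe_daily_history
-- ===== SOURCE A (Python) =====
-- def dedupe_daily_history(history: list[dict],
--                          exclude_dates: set[str] | None = None) -> list[dict]:
--     """동일 date 는 마지막 entry 만 유지, date 오름차순 정렬.
--     exclude_dates 에 포함된 일자는 결과에서 제거 (휴장일 오염 정정용)."""
--     excl = exclude_dates or set()
--     by_date: dict[str, dict] = {}
--     for entry in history:
--         date = entry.get("date", "")
--         if date and date not in excl:
--             by_date[date] = entry  # 뒤에 나오는 것이 덮어씀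
--     return [by_date[d] for d in sorted(by_date.keys())]
-- ===== SOURCE B (Python) =====
-- def dedupe_daily_history(history, exclude_dates=None):
--     excl = exclude_dates or set()
--     kept = [e for e in history
--             if e.get("date", "") and e.get("date", "") not in excl]
--     kept.sort(key=lambda e: e.get("date", ""))  # stable: ties keep input order
--     out = []
--     for e in kept:
--         if out and out[-1].get("date", "") == e.get("date", ""):
--             out[-1] = e  # last of an equal-date run wins
--         else:
--             out.append(e)
--     return out
-- ===== Notes on version B (the rewrite author's own statement) =====
-- stated objective: alternative
-- what changed: Replaces A's last-wins dict index plus sort-of-keys-and-lookup with filter, a stable sort of the entries by date, and a single run-collapsing pass that keeps the last entry of each equal-date run.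
import Mathlib
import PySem

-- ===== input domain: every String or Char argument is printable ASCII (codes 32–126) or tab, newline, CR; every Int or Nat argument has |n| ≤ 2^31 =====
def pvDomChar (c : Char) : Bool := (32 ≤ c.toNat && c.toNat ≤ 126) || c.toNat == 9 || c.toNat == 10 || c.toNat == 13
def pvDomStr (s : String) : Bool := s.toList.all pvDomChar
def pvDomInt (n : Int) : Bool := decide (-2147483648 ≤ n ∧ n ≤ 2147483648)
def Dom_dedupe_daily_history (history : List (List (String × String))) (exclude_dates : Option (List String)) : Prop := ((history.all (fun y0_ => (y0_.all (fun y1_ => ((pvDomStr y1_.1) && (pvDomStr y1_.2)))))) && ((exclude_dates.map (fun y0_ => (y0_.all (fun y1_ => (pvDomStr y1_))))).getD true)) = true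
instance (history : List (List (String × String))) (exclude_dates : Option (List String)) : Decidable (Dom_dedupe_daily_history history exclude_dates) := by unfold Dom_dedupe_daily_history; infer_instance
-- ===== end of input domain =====

-- B replaces A's last-wins dict index + sorted-keys lookup by filter, stable sort by date,
-- then one pass collapsing each run of equal dates to its last entry (alternative decomposition).

-- ===== PORT A =====
-- entry.get("date", "") on the association-list dict
def pvDate (e : List (String × String)) : String := (PySem.Dict.mk e).getD "date" ""

-- the body of A's for-loop: if date and date not in excl: by_date[date] = entry
def pvStepA (excl : List String) (d : PySem.Dict String (List (String × String))) (entry : List (String × String)) : PySem.Dict String (List (String × String)) :=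
  let date := pvDate entry
  if (date != "") && !(PySem.Set.contains excl date) then d.insert date entry else d

def dedupe_daily_history (history : List (List (String × String))) (exclude_dates : Option (List String)) : List (List (String × String)) :=
  -- excl = exclude_dates or set()  (None and the empty set both give the empty set)
  let excl : PySem.Set String := exclude_dates.getD []
  let by_date := history.foldl (pvStepA excl) PySem.Dict.empty
  (PySem.List.sorted by_date.keys (fun k => k) false).map (fun d => by_date.getD d [])

-- ===== PORT B =====
-- the body of B's run-collapsing loop: overwrite out[-1] while the date repeats, else append
def pvStepB (out : List (List (String × String))) (e : List (String × String)) : List (List (String × String)) :=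
  match out.getLast? with
  | some l => if pvDate l == pvDate e then out.dropLast ++ [e] else out ++ [e]
  | none => out ++ [e]

def dedupe_daily_history_alt (history : List (List (String × String))) (exclude_dates : Option (List String)) : List (List (String × String)) :=
  let excl : PySem.Set String := exclude_dates.getD []
  let kept := history.filter (fun e => (pvDate e != "") && !(PySem.Set.contains excl (pvDate e)))
  let srt := PySem.List.sorted kept (fun e => pvDate e) false
  srt.foldl pvStepB []

-- ===== PRECONDITION & SPEC =====
def Spec_dedupe_daily_history (history : List (List (String × String))) (exclude_dates : Option (List String)) (out : List (List (String × String))) : Prop := out = dedupe_daily_history_alt history exclude_dates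
instance (history : List (List (String × String))) (exclude_dates : Option (List String)) (out : List (List (String × String))) : Decidable (Spec_dedupe_daily_history history exclude_dates out) := by unfold Spec_dedupe_daily_history; infer_instance

-- ===== CLAIM (what is proved, stated in full; the proofs are below) =====
def Claim_equal_dedupe_daily_history : Prop := ∀ (history : List (List (String × String))) (exclude_dates : Option (List String)), Dom_dedupe_daily_history history exclude_dates → Spec_dedupe_daily_history history exclude_dates (dedupe_daily_history history exclude_dates)

-- ===== LEMMAS AND PROOFS =====

-- an entry is kept iff its date is nonempty and not excluded
def pvKeep (excl : List String) (e : List (String × String)) : Bool :=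
  (pvDate e != "") && !(PySem.Set.contains excl (pvDate e))

-- the kept entries of hs carrying date k, in order
def pvFilt (excl : List String) (k : String) (hs : List (List (String × String))) : List (List (String × String)) :=
  hs.filter (fun e => pvKeep excl e && (pvDate e == k))

-- proof-side recursion form of B's collapsing loop
def pvCollapse : List (List (String × String)) → List (List (String × String))
  | [] => []
  | [e] => [e]
  | a :: b :: t => if pvDate a == pvDate b then pvCollapse (b :: t) else a :: pvCollapse (b :: t)

theorem pvStepA_eq (excl : List String) (d : PySem.Dict String (List (String × String))) (e : List (String × String)) :
    pvStepA excl d e = if pvKeep excl e then d.insert (pvDate e) e else d := rfl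

-- A's dict fold looks up to the LAST kept entry with the given date
theorem pvFoldA_get? (excl : List String) (hs : List (List (String × String))) (d : PySem.Dict String (List (String × String))) (k : String) :
    (hs.foldl (pvStepA excl) d).get? k = ((pvFilt excl k hs).getLast?).or (d.get? k) := by
  induction hs using List.reverseRecOn with
  | nil => simp [pvFilt]
  | append_singleton t e ih =>
    rw [List.foldl_append, List.foldl_cons, List.foldl_nil, pvStepA_eq]
    have hfil : pvFilt excl k (t ++ [e])
        = pvFilt excl k t ++ (if pvKeep excl e && (pvDate e == k) then [e] else []) := by
      simp [pvFilt, List.filter_append, List.filter_cons]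
    by_cases hk : pvKeep excl e = true
    · by_cases hd : pvDate e = k
      · subst hd
        rw [if_pos hk, hfil, PySem.Dict.get?_insert]
        simp [hk]
      · rw [if_pos hk, hfil, PySem.Dict.get?_insert, if_neg (Ne.symm hd)]
        have : (pvDate e == k) = false := by simp [hd]
        simp [this, ih]
    · rw [if_neg hk, hfil]
      simp only [Bool.not_eq_true] at hk
      simp [hk, ih]

theorem pvFoldA_nodup_keys (excl : List String) (hs : List (List (String × String))) (d : PySem.Dict String (List (String × String))) (h : d.keys.Nodup) :
    (hs.foldl (pvStepA excl) d).keys.Nodup := by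
  induction hs generalizing d with
  | nil => exact h
  | cons e t ih =>
    rw [List.foldl_cons, pvStepA_eq]
    by_cases hk : pvKeep excl e = true
    · rw [if_pos hk]; exact ih _ (PySem.Dict.nodup_keys_insert _ _ _ h)
    · rw [if_neg hk]; exact ih _ h

-- B's loop equals the run-collapsing recursion
theorem pvFoldB_concat (acc : List (List (String × String))) (c : List (String × String)) (l : List (List (String × String))) :
    l.foldl pvStepB (acc ++ [c]) = acc ++ pvCollapse (c :: l) := by
  induction l generalizing acc c with
  | nil => simp [pvCollapse]
  | cons e t ih =>
    rw [List.foldl_cons]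
    by_cases hde : (pvDate c == pvDate e) = true
    · have hstep : pvStepB (acc ++ [c]) e = acc ++ [e] := by
        simp [pvStepB, hde]
      rw [hstep, ih, show pvCollapse (c :: e :: t) = pvCollapse (e :: t) by
        simp only [pvCollapse]; rw [if_pos hde]]
    · have hstep : pvStepB (acc ++ [c]) e = (acc ++ [c]) ++ [e] := by
        simp [pvStepB, hde]
      rw [hstep, ih, show pvCollapse (c :: e :: t) = c :: pvCollapse (e :: t) by
        simp only [pvCollapse]; rw [if_neg hde]]
      simp

theorem pvFoldB_eq (l : List (List (String × String))) :
    l.foldl pvStepB [] = pvCollapse l := by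
  cases l with
  | nil => rfl
  | cons e t =>
    rw [List.foldl_cons, show pvStepB [] e = [] ++ [e] from rfl, pvFoldB_concat]
    simp

theorem pvCollapse_subset (l : List (List (String × String))) : ∀ x ∈ pvCollapse l, x ∈ l := by
  induction l using pvCollapse.induct with
  | case1 => intro x hx; simp [pvCollapse] at hx
  | case2 e => intro x hx; simpa [pvCollapse] using hx
  | case3 a b t hde ih =>
    intro x hx
    rw [show pvCollapse (a :: b :: t) = pvCollapse (b :: t) from by
      simp only [pvCollapse]; rw [if_pos hde]] at hx
    exact List.mem_cons_of_mem _ (ih x hx)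
  | case4 a b t hde ih =>
    intro x hx
    rw [show pvCollapse (a :: b :: t) = a :: pvCollapse (b :: t) from by
      simp only [pvCollapse]; rw [if_neg hde]] at hx
    rcases List.mem_cons.mp hx with rfl | hx'
    · exact List.mem_cons_self
    · exact List.mem_cons_of_mem _ (ih x hx')

-- on a list with non-decreasing dates, pvCollapse keeps exactly the last entry of each date-run
theorem pvCollapse_mem (l : List (List (String × String))) (hp : l.Pairwise (fun a b => pvDate a ≤ pvDate b)) (x : List (String × String)) :
    x ∈ pvCollapse l ↔ (l.filter (fun e => pvDate e == pvDate x)).getLast? = some x := by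
  induction l using pvCollapse.induct with
  | case1 => simp [pvCollapse]
  | case2 e =>
    simp only [pvCollapse, List.mem_singleton, List.filter_cons, List.filter_nil]
    by_cases hd : pvDate e = pvDate x
    · simp [hd]
      constructor
      · rintro rfl; rfl
      · intro h; exact h.symm
    · have : (pvDate e == pvDate x) = false := by simp [hd]
      simp [this]
      intro h; subst h; exact hd rfl
  | case3 a b t hde ih =>
    have hab : pvDate a = pvDate b := by simpa using hde
    have htail : (b :: t).Pairwise (fun a b => pvDate a ≤ pvDate b) :=
      List.Pairwise.sublist (List.sublist_cons_self _ _) hp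
    rw [show pvCollapse (a :: b :: t) = pvCollapse (b :: t) from by
      simp only [pvCollapse]; rw [if_pos hde]]
    rw [ih htail]
    by_cases hax : pvDate a = pvDate x
    · have hbx : pvDate b = pvDate x := hab ▸ hax
      have hbmem : b ∈ (b :: t).filter (fun e => pvDate e == pvDate x) := by
        rw [List.mem_filter]; exact ⟨List.mem_cons_self, by simp [hbx]⟩
      obtain ⟨c, cs, hcs⟩ := List.exists_cons_of_ne_nil (List.ne_nil_of_mem hbmem)
      rw [show (a :: b :: t).filter (fun e => pvDate e == pvDate x)
          = a :: (b :: t).filter (fun e => pvDate e == pvDate x) from by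
        rw [List.filter_cons, if_pos (by simp [hax])]]
      rw [hcs, List.getLast?_cons_cons]
    · rw [show (a :: b :: t).filter (fun e => pvDate e == pvDate x)
          = (b :: t).filter (fun e => pvDate e == pvDate x) from by
        rw [List.filter_cons, if_neg (by simp [hax])]]
  | case4 a b t hde ih =>
    have hab : pvDate a ≠ pvDate b := by simpa using hde
    have htail : (b :: t).Pairwise (fun a b => pvDate a ≤ pvDate b) :=
      List.Pairwise.sublist (List.sublist_cons_self _ _) hp
    have hple : ∀ y ∈ b :: t, pvDate a ≤ pvDate y := (List.pairwise_cons.mp hp).1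
    have hplt : ∀ y ∈ b :: t, pvDate a < pvDate y := by
      intro y hy
      rcases List.mem_cons.mp hy with rfl | hy'
      · exact lt_of_le_of_ne (hple y hy) hab
      · exact lt_of_lt_of_le (lt_of_le_of_ne (hple b List.mem_cons_self) hab)
          ((List.pairwise_cons.mp htail).1 y hy')
    rw [show pvCollapse (a :: b :: t) = a :: pvCollapse (b :: t) from by
      simp only [pvCollapse]; rw [if_neg hde]]
    rw [List.mem_cons, ih htail]
    by_cases hax : pvDate a = pvDate x
    · have hnil : (b :: t).filter (fun e => pvDate e == pvDate x) = [] := by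
        rw [List.filter_eq_nil_iff]
        intro y hy hyx
        have hlt2 := hplt y hy
        rw [hax] at hlt2
        exact absurd (beq_iff_eq.mp hyx) (ne_of_gt hlt2)
      rw [show (a :: b :: t).filter (fun e => pvDate e == pvDate x)
          = a :: (b :: t).filter (fun e => pvDate e == pvDate x) from by
        rw [List.filter_cons, if_pos (by simp [hax])]]
      rw [hnil]
      simp [eq_comm]
    · rw [show (a :: b :: t).filter (fun e => pvDate e == pvDate x)
          = (b :: t).filter (fun e => pvDate e == pvDate x) from by
        rw [List.filter_cons, if_neg (by simp [hax])]]
      constructor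
      · rintro (rfl | h)
        · exact absurd rfl hax
        · exact h
      · intro h; exact Or.inr h

theorem pvCollapse_pairwise (l : List (List (String × String))) (hp : l.Pairwise (fun a b => pvDate a ≤ pvDate b)) :
    (pvCollapse l).Pairwise (fun a b => pvDate a < pvDate b) := by
  induction l using pvCollapse.induct with
  | case1 => simp [pvCollapse]
  | case2 e => simp [pvCollapse]
  | case3 a b t hde ih =>
    rw [show pvCollapse (a :: b :: t) = pvCollapse (b :: t) by
      simp only [pvCollapse]; rw [if_pos hde]]
    exact ih (List.Pairwise.sublist (List.sublist_cons_self _ _) hp)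
  | case4 a b t hde ih =>
    rw [show pvCollapse (a :: b :: t) = a :: pvCollapse (b :: t) by
      simp only [pvCollapse]; rw [if_neg hde]]
    have hab : pvDate a ≠ pvDate b := by simpa using hde
    have hple : ∀ y ∈ b :: t, pvDate a ≤ pvDate y := by
      intro y hy; exact (List.pairwise_cons.mp hp).1 y hy
    refine List.pairwise_cons.mpr ⟨?_, ih (List.Pairwise.sublist (List.sublist_cons_self _ _) hp)⟩
    intro y hy
    have hyin := pvCollapse_subset _ _ hy
    rcases List.mem_cons.mp hyin with rfl | hyin'
    · exact lt_of_le_of_ne (hple y List.mem_cons_self) hab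
    · exact lt_of_lt_of_le (lt_of_le_of_ne (hple b List.mem_cons_self) hab)
        ((List.pairwise_cons.mp (List.Pairwise.sublist (List.sublist_cons_self _ _) hp)).1 y hyin')

-- filtering a key-equality class commutes with a sorted insertion (the new element lands at the end of its run)
theorem pvFilter_insertBy (key : List (String × String) → String) (d : String) (x : List (String × String)) (ys : List (List (String × String))) (hys : ys.Pairwise (fun a b => key a ≤ key b)) :
    (PySem.List.insertBy (fun a b => decide (key a < key b)) x ys).filter (fun e => key e == d)
      = if key x = d then ys.filter (fun e => key e == d) ++ [x] else ys.filter (fun e => key e == d) := by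
  induction ys with
  | nil =>
    simp only [PySem.List.insertBy, List.filter_cons, List.filter_nil]
    by_cases h : key x = d
    · simp [h]
    · simp [h]
  | cons y ys ih =>
    simp only [PySem.List.insertBy]
    by_cases hlt : key x < key y
    · rw [if_pos (by simpa using hlt)]
      by_cases hxd : key x = d
      · have hnil : (y :: ys).filter (fun e => key e == d) = [] := by
          rw [List.filter_eq_nil_iff]
          intro z hz hzd
          have hyz : key y ≤ key z := by
            rcases List.mem_cons.mp hz with rfl | hz'
            · exact le_refl _
            · exact (List.pairwise_cons.mp hys).1 z hz'
          have hlt2 : key x < key z := lt_of_lt_of_le hlt hyz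
          rw [hxd] at hlt2
          exact absurd (beq_iff_eq.mp hzd) (ne_of_gt hlt2)
        rw [List.filter_cons, if_pos (by simp [hxd]), hnil, if_pos hxd]
        rfl
      · rw [List.filter_cons, if_neg (by simp [hxd]), if_neg hxd]
    · rw [if_neg (by simpa using hlt)]
      rw [List.filter_cons, List.filter_cons,
        ih (List.Pairwise.sublist (List.sublist_cons_self _ _) hys)]
      by_cases hxd : key x = d
      · rw [if_pos hxd, if_pos hxd]
        by_cases hyd : (key y == d) = true
        · rw [if_pos hyd, if_pos hyd]; rfl
        · rw [if_neg hyd, if_neg hyd]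
      · rw [if_neg hxd, if_neg hxd]

-- stability of PySem's sort: each key-equality class keeps its original order
theorem pvSorted_filter (xs : List (List (String × String))) (key : List (String × String) → String) (d : String) :
    (PySem.List.sorted xs key false).filter (fun e => key e == d) = xs.filter (fun e => key e == d) := by
  induction xs using List.reverseRecOn with
  | nil => simp [PySem.List.sorted_eq_foldl_insertBy]
  | append_singleton t x ih =>
    have hst : PySem.List.sorted (t ++ [x]) key false
        = PySem.List.insertBy (fun a b => decide (key a < key b)) x (PySem.List.sorted t key false) := by
      rw [PySem.List.sorted_eq_foldl_insertBy, PySem.List.sorted_eq_foldl_insertBy, List.foldl_append,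
        List.foldl_cons, List.foldl_nil]
    rw [hst, pvFilter_insertBy key d x _ (PySem.List.sorted_pairwise t key), ih,
      List.filter_append, List.filter_cons, List.filter_nil]
    by_cases hxd : key x = d
    · rw [if_pos hxd, if_pos (by simp [hxd])]
    · rw [if_neg hxd, if_neg (by simp [hxd]), List.append_nil]

-- ===== VERDICT (by name: the statement is the Claim_ definition above) =====
theorem dedupe_daily_history_spec : Claim_equal_dedupe_daily_history := by
  intro history exclude_dates _
  unfold Spec_dedupe_daily_history dedupe_daily_history dedupe_daily_history_alt
  simp only []
  set excl := exclude_dates.getD [] with hexcl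
  set D := history.foldl (pvStepA excl) PySem.Dict.empty with hD
  set kept := history.filter (fun e => (pvDate e != "") && !(PySem.Set.contains excl (pvDate e))) with hkept
  set srt := PySem.List.sorted kept (fun e => pvDate e) false with hsrt
  rw [pvFoldB_eq]
  have hKnd : D.keys.Nodup := pvFoldA_nodup_keys excl history _ PySem.Dict.nodup_keys_empty
  have hget : ∀ k, D.get? k = (pvFilt excl k history).getLast? := by
    intro k
    rw [hD, pvFoldA_get?, PySem.Dict.get?_empty, Option.or_none]
  have hkey : ∀ k v, D.get? k = some v → pvDate v = k ∧ pvKeep excl v = true := by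
    intro k v hv
    rw [hget] at hv
    have hm := List.mem_of_getLast? hv
    rw [pvFilt, List.mem_filter] at hm
    have := hm.2
    simp only [Bool.and_eq_true, beq_iff_eq] at this
    exact ⟨this.2, this.1⟩
  have hmemA : ∀ x, x ∈ (PySem.List.sorted D.keys (fun k => k) false).map (fun d => D.getD d [])
      ↔ (pvFilt excl (pvDate x) history).getLast? = some x := by
    intro x
    constructor
    · intro hx
      rcases List.mem_map.mp hx with ⟨k, hk, hgd⟩
      rw [PySem.List.mem_sorted] at hk
      have hne : D.get? k ≠ none := by rw [Ne, PySem.Dict.get?_eq_none_iff_not_mem_keys]; simp [hk]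
      rcases Option.ne_none_iff_exists'.mp hne with ⟨v, hv⟩
      have hgdv : D.getD k [] = v := PySem.Dict.getD_of_get?_eq_some _ _ hv
      rw [hgdv] at hgd; subst hgd
      obtain ⟨hd, _⟩ := hkey _ _ hv
      rw [hd, ← hget]; exact hv
    · intro hlast
      have hv : D.get? (pvDate x) = some x := by rw [hget]; exact hlast
      have hk : pvDate x ∈ D.keys := by
        by_contra hn
        rw [← PySem.Dict.get?_eq_none_iff_not_mem_keys] at hn
        rw [hv] at hn; exact Option.some_ne_none _ hn
      exact List.mem_map.mpr ⟨pvDate x, (PySem.List.mem_sorted _ _ _ _).mpr hk,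
        PySem.Dict.getD_of_get?_eq_some _ _ hv⟩
  have hsrtpw : srt.Pairwise (fun a b => pvDate a ≤ pvDate b) :=
    PySem.List.sorted_pairwise kept (fun e => pvDate e)
  have hmemB : ∀ x, x ∈ pvCollapse srt ↔ (pvFilt excl (pvDate x) history).getLast? = some x := by
    intro x
    have hff : kept.filter (fun e => pvDate e == pvDate x) = pvFilt excl (pvDate x) history := by
      rw [hkept, List.filter_filter, pvFilt]
      exact List.filter_congr (fun e _ => by simp [pvKeep, Bool.and_comm])
    rw [pvCollapse_mem srt hsrtpw x, hsrt, pvSorted_filter, hff]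
  have hpwB : (pvCollapse srt).Pairwise (fun a b => pvDate a < pvDate b) :=
    pvCollapse_pairwise srt hsrtpw
  have hsortedNd : (PySem.List.sorted D.keys (fun k => k) false).Nodup :=
    ((PySem.List.sorted_perm D.keys (fun k => k) false).symm).nodup hKnd
  have hdateGetD : ∀ k ∈ D.keys, pvDate (D.getD k []) = k := by
    intro k hk
    have hne : D.get? k ≠ none := by rw [Ne, PySem.Dict.get?_eq_none_iff_not_mem_keys]; simp [hk]
    rcases Option.ne_none_iff_exists'.mp hne with ⟨v, hv⟩
    rw [PySem.Dict.getD_of_get?_eq_some _ _ hv]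
    exact (hkey _ _ hv).1
  have hndA : ((PySem.List.sorted D.keys (fun k => k) false).map (fun d => D.getD d [])).Nodup := by
    refine List.Nodup.map_on ?_ hsortedNd
    intro a ha b hb hab
    rw [PySem.List.mem_sorted] at ha hb
    calc a = pvDate (D.getD a []) := (hdateGetD a ha).symm
    _ = pvDate (D.getD b []) := by rw [hab]
    _ = b := hdateGetD b hb
  have hndB : (pvCollapse srt).Nodup := by
    refine hpwB.imp ?_
    intro a b h heq
    rw [heq] at h
    exact lt_irrefl _ h
  have hpwA : ((PySem.List.sorted D.keys (fun k => k) false).map (fun d => D.getD d [])).Pairwise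
      (fun a b => pvDate a < pvDate b) := by
    rw [List.pairwise_map]
    have hle : (PySem.List.sorted D.keys (fun k => k) false).Pairwise (fun a b => a ≤ b) :=
      PySem.List.sorted_pairwise D.keys (fun k => k)
    have hlt : (PySem.List.sorted D.keys (fun k => k) false).Pairwise (fun a b => a < b) := by
      have hne : (PySem.List.sorted D.keys (fun k => k) false).Pairwise (fun a b => a ≠ b) := hsortedNd
      exact (List.Pairwise.and hle hne).imp (fun h => lt_of_le_of_ne h.1 h.2)
    refine List.Pairwise.imp_of_mem ?_ hlt
    intro a b ha hb hab
    rw [PySem.List.mem_sorted] at ha hb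
    rw [hdateGetD a ha, hdateGetD b hb]
    exact hab
  have hperm : ((PySem.List.sorted D.keys (fun k => k) false).map (fun d => D.getD d [])).Perm (pvCollapse srt) :=
    (List.perm_ext_iff_of_nodup hndA hndB).mpr (fun x => (hmemA x).trans (hmemB x).symm)
  exact List.Perm.eq_of_pairwise
    (fun a b _ _ h1 h2 => absurd h2 (asymm h1)) hpwA hpwB hperm
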